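-- pv_equiv track=rewrite | github.com/aya-baur/Encryption-Program | cipher_functions.py | get_small_joker_value
-- ===== SOURCE A (Python) =====
-- from typing import List
--
-- def get_small_joker_value(deck: List[int]) -> int:
--     ''' Return the value of the small joker for the given deck of cards.
--     Small joker is the second highers card.
--
--     >>> deck = [2, 4, 9, 3, 15, 18]
--     >>> get_small_joker_value(deck)
--     15
--     >>> deck = [3, 6, 1, 7, 8, 9]
--     >>> get_small_joker_value(deck)
--     8
--     '''
--     maximum = 0
--     second_max = 0
--     for num in deck:
--         if num > maximum:
--             maximum = num
--     for num in deck: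
--         if second_max < num < maximum:
--             second_max = num
--     return second_max
-- ===== SOURCE B (Python) =====
-- from typing import List
--
-- def get_small_joker_value(deck: List[int]) -> int:
--     maximum = 0
--     second_max = 0
--     for num in deck:
--         if num > maximum:
--             second_max = maximum
--             maximum = num
--         elif second_max < num < maximum:
--             second_max = num
--     return second_max
-- ===== Notes on version B (the rewrite author's own statement) =====
-- stated objective: simpler
-- what changed: Replace the two sequential scans (first find the maximum, then find the largest value strictly below it) with a single pass that maintains the running maximum and the running second value together.
import Mathlib
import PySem

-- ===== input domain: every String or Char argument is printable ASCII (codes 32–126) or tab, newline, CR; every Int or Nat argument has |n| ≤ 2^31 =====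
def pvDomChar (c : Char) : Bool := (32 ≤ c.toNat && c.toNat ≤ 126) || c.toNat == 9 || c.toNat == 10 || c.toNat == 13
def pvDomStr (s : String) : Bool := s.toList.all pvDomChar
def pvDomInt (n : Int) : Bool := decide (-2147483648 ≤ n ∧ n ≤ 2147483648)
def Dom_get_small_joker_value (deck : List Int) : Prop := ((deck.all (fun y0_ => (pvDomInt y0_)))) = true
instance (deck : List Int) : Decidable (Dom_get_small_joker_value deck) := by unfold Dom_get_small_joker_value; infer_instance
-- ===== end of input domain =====

-- B: merges A's two sequential scans into one pass maintaining (maximum, second_max) together (objective: simpler).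
-- ===== PORT A =====
def get_small_joker_value (deck : List Int) : Int :=
  let maximum := deck.foldl (fun maximum num => if num > maximum then num else maximum) 0
  let second_max := deck.foldl (fun second_max num =>
    if second_max < num ∧ num < maximum then num else second_max) 0
  second_max

-- ===== PORT B =====
def get_small_joker_value_alt (deck : List Int) : Int :=
  let p := deck.foldl (fun (ms : Int × Int) num =>
    if num > ms.1 then (num, ms.1)
    else if ms.2 < num ∧ num < ms.1 then (ms.1, num) else ms) (0, 0)
  p.2

-- ===== PRECONDITION & SPEC =====
def Spec_get_small_joker_value (deck : List Int) (out : Int) : Prop := out = get_small_joker_value_alt deck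
instance (deck : List Int) (out : Int) : Decidable (Spec_get_small_joker_value deck out) := by unfold Spec_get_small_joker_value; infer_instance

-- ===== CLAIM (what is proved, stated in full; the proofs are below) =====
def Claim_equal_get_small_joker_value : Prop := ∀ (deck : List Int), Dom_get_small_joker_value deck → Spec_get_small_joker_value deck (get_small_joker_value deck)

-- ===== LEMMAS AND PROOFS =====

-- ===== VERDICT (by name: the statement is the Claim_ definition above) =====
-- step functions
def pvMstep (m num : Int) : Int := if num > m then num else m
def pvAstep (maximum s num : Int) : Int := if s < num ∧ num < maximum then num else s
def pvBstep (ms : Int × Int) (num : Int) : Int × Int :=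
  if num > ms.1 then (num, ms.1)
  else if ms.2 < num ∧ num < ms.1 then (ms.1, num) else ms

lemma le_foldl_Mstep (l : List Int) (s : Int) : s ≤ l.foldl pvMstep s := by
  induction l generalizing s with
  | nil => simp
  | cons x xs ih =>
    simp only [List.foldl_cons]
    refine le_trans ?_ (ih (pvMstep s x))
    simp [pvMstep]; split <;> omega

lemma mem_le_foldl_Mstep (l : List Int) (s x : Int) (hx : x ∈ l) :
    x ≤ l.foldl pvMstep s := by
  induction l generalizing s with
  | nil => cases hx
  | cons y ys ih =>
    simp only [List.foldl_cons]
    rcases List.mem_cons.mp hx with h | h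
    · subst h
      refine le_trans ?_ (le_foldl_Mstep ys (pvMstep s x))
      simp [pvMstep]; split <;> omega
    · exact ih _ h

-- when every element is below c, the A-step fold equals the max fold
lemma Astep_eq_Mstep (l : List Int) (c : Int) (h : ∀ x ∈ l, x < c) (s : Int) :
    l.foldl (pvAstep c) s = l.foldl pvMstep s := by
  induction l generalizing s with
  | nil => rfl
  | cons x xs ih =>
    simp only [List.foldl_cons]
    have hx : x < c := h x (List.mem_cons_self ..)
    have hstep : pvAstep c s x = pvMstep s x := by
      simp [pvAstep, pvMstep]; split <;> split <;> omega
    rw [hstep, ih (fun y hy => h y (List.mem_cons_of_mem _ hy))]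

lemma key (l : List Int) :
    l.foldl pvBstep (0, 0) =
      (l.foldl pvMstep 0, l.foldl (pvAstep (l.foldl pvMstep 0)) 0) := by
  induction l using List.reverseRecOn with
  | nil => simp
  | append_singleton xs n ih =>
    simp only [List.foldl_append, List.foldl_cons, List.foldl_nil, ih]
    set m := xs.foldl pvMstep 0 with hm
    have hm0 : 0 ≤ m := le_foldl_Mstep xs 0
    by_cases hgt : n > m
    · have hM : pvMstep m n = n := by simp [pvMstep, hgt]
      have hall : ∀ x ∈ xs, x < n :=
        fun x hx => lt_of_le_of_lt (mem_le_foldl_Mstep xs 0 x hx) hgt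
      have hS : xs.foldl (pvAstep n) 0 = m := by rw [Astep_eq_Mstep xs n hall]
      have hB : pvBstep (m, xs.foldl (pvAstep m) 0) n = (n, m) := by
        simp [pvBstep, hgt]
      rw [hB, hM, hS]
      have : pvAstep n m n = m := by simp [pvAstep]
      rw [this]
    · have hM : pvMstep m n = m := by simp [pvMstep, hgt]
      rw [hM]
      set s := xs.foldl (pvAstep m) 0 with hs
      have hB : pvBstep (m, s) n = (m, pvAstep m s n) := by
        simp only [pvBstep, pvAstep]
        split
        · omega
        · split <;> rfl
      rw [hB]

theorem get_small_joker_value_spec : Claim_equal_get_small_joker_value := by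
  intro deck _
  show deck.foldl (pvAstep (deck.foldl pvMstep 0)) 0 = (deck.foldl pvBstep (0, 0)).2
  rw [key]
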